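-- pv_equiv track=rewrite | github.com/vishalgojha/contact-agent | tools.py | _extract_vcard_name
-- ===== SOURCE A (Python) =====
-- def _extract_vcard_name(block: list[str]) -> str:
--     for line in block:
--         if line.upper().startswith("FN"):
--             return line.split(":", 1)[-1].strip()
--     for line in block:
--         if line.upper().startswith("N:"):
--             parts = [part.strip() for part in line.split(":", 1)[-1].split(";")]
--             ordered = [parts[1], parts[2], parts[0]] if len(parts) >= 3 else parts
--             name = " ".join(part for part in ordered if part)
--             if name:
--                 return name
--     return ""
-- ===== SOURCE B (Python) =====
-- def _extract_vcard_name(block: list[str]) -> str: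
--     fn_value = None
--     n_value = None
--     for line in block:
--         u = line.upper()
--         if fn_value is None and u.startswith("FN"):
--             fn_value = line.split(":", 1)[-1].strip()
--         elif n_value is None and u.startswith("N:"):
--             parts = [part.strip() for part in line.split(":", 1)[-1].split(";")]
--             ordered = [parts[1], parts[2], parts[0]] if len(parts) >= 3 else parts
--             name = " ".join(part for part in ordered if part)
--             if name:
--                 n_value = name
--     if fn_value is not None:
--         return fn_value
--     if n_value is not None:
--         return n_value
--     return ""
-- ===== Notes on version B (the rewrite author's own statement) =====
-- stated objective: alternative
-- what changed: Replaces A's two sequential scans (one for FN, then a second full scan for N:) by a single pass that tracks the first FN value and the first non-empty N: name with None sentinels and selects FN over N after the loop.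
import Mathlib
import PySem

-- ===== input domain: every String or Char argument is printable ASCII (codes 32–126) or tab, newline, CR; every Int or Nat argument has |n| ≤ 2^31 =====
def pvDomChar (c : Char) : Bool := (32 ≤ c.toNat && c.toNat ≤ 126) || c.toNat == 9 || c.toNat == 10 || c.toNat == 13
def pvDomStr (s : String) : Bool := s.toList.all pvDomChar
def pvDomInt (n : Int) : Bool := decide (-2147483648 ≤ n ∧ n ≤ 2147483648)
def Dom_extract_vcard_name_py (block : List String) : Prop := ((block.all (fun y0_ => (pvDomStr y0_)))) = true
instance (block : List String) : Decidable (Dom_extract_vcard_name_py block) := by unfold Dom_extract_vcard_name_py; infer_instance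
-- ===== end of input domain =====

-- B does one pass tracking FN and N values with None sentinels, instead of A's two sequential scans; same cost, different decomposition.

-- shared per-line helpers (both Pythons compute these identical expressions)
-- line.split(":", 1)[-1].strip()
def pvFNVal (line : String) : String :=
  PySem.Str.strip ((PySem.List.pyGet? ((PySem.Str.splitMax? line ":" 1).getD []) (-1)).getD "")
-- parts / ordered / " ".join(part for part in ordered if part)
def pvNName (line : String) : String :=
  let parts := (((PySem.Str.split? ((PySem.List.pyGet? ((PySem.Str.splitMax? line ":" 1).getD []) (-1)).getD "") ";").getD [])).map PySem.Str.strip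
  let ordered := if parts.length ≥ 3 then
      [(PySem.List.pyGet? parts 1).getD "", (PySem.List.pyGet? parts 2).getD "", (PySem.List.pyGet? parts 0).getD ""]
    else parts
  PySem.Str.join " " (ordered.filter (fun p => p ≠ ""))

-- ===== PORT A =====
-- first loop: early return of split(":",1)[-1].strip() on the first FN line
def pvLoop1 : List String → Option String
  | [] => none
  | line :: rest =>
    if PySem.Str.startswith (PySem.Str.upper line) "FN" then some (pvFNVal line)
    else pvLoop1 rest

-- second loop: early return on the first N: line whose joined name is non-empty
def pvLoop2 : List String → Option String
  | [] => none
  | line :: rest =>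
    if PySem.Str.startswith (PySem.Str.upper line) "N:" then
      let name := pvNName line
      if name ≠ "" then some name else pvLoop2 rest
    else pvLoop2 rest

def extract_vcard_name_py (block : List String) : String :=
  match pvLoop1 block with
  | some v => v
  | none =>
    match pvLoop2 block with
    | some v => v
    | none => ""

-- ===== PORT B =====
-- the single pass over block maintaining (fn_value, n_value)
def pvScan : List String → Option String → Option String → Option String × Option String
  | [], fn, n => (fn, n)
  | line :: rest, fn, n =>
    let u := PySem.Str.upper line
    if fn.isNone && PySem.Str.startswith u "FN" then
      pvScan rest (some (pvFNVal line)) n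
    else if n.isNone && PySem.Str.startswith u "N:" then
      let name := pvNName line
      pvScan rest fn (if name ≠ "" then some name else n)
    else
      pvScan rest fn n

-- the prioritized selection after the loop
def pvSelect : Option String × Option String → String
  | (some v, _) => v
  | (none, some v) => v
  | (none, none) => ""

def extract_vcard_name_py_alt (block : List String) : String :=
  pvSelect (pvScan block none none)

-- ===== PRECONDITION & SPEC =====
def Spec_extract_vcard_name_py (block : List String) (out : String) : Prop := out = extract_vcard_name_py_alt block
instance (block : List String) (out : String) : Decidable (Spec_extract_vcard_name_py block out) := by unfold Spec_extract_vcard_name_py; infer_instance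

-- ===== CLAIM (what is proved, stated in full; the proofs are below) =====
def Claim_equal_extract_vcard_name_py : Prop := ∀ (block : List String), Dom_extract_vcard_name_py block → Spec_extract_vcard_name_py block (extract_vcard_name_py block)

-- ===== LEMMAS AND PROOFS =====

-- once fn_value is set, the scan's first component never changes
theorem pvScan_fst_some (block : List String) (v : String) (n : Option String) :
    (pvScan block (some v) n).1 = some v := by
  induction block generalizing n with
  | nil => rfl
  | cons line rest ih =>
    rw [pvScan]
    by_cases h : (PySem.Str.startswith (PySem.Str.upper line) "N:") = true
    · simp only [Option.isNone_some, Bool.false_and, Bool.false_eq_true, if_false, h]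
      cases n <;> simp [ih]
    · simp only [Option.isNone_some, Bool.false_and, Bool.false_eq_true, if_false, h]
      simp [ih]

theorem pvSelect_fst_some {p : Option String × Option String} {v : String} (h : p.1 = some v) :
    pvSelect p = v := by
  obtain ⟨a, b⟩ := p; cases a <;> simp_all [pvSelect]

-- with fn unset and n already set, the scan returns the first FN value if any, else n
theorem pvScan_n_some (block : List String) (name : String) :
    pvSelect (pvScan block none (some name)) =
      (match pvLoop1 block with | some v => v | none => name) := by
  induction block with
  | nil => rfl
  | cons line rest ih =>
    simp only [pvScan, pvLoop1, Option.isNone_none, Option.isNone_some, Bool.true_and,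
      Bool.false_and, Bool.false_eq_true, if_false]
    by_cases hFN : PySem.Str.startswith (PySem.Str.upper line) "FN" = true
    · rw [if_pos hFN, if_pos hFN]
      exact pvSelect_fst_some (pvScan_fst_some rest (pvFNVal line) (some name))
    · rw [if_neg hFN, if_neg hFN]
      exact ih

-- main invariant: the single pass from the empty state computes A's two-scan result
theorem pvScan_main (block : List String) :
    pvSelect (pvScan block none none) = extract_vcard_name_py block := by
  induction block with
  | nil => rfl
  | cons line rest ih =>
    unfold extract_vcard_name_py at ih ⊢
    simp only [pvScan, pvLoop1, pvLoop2, Option.isNone_none, Bool.true_and]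
    by_cases hFN : PySem.Str.startswith (PySem.Str.upper line) "FN" = true
    · rw [if_pos hFN, if_pos hFN]
      exact pvSelect_fst_some (pvScan_fst_some rest (pvFNVal line) none)
    · rw [if_neg hFN, if_neg hFN]
      by_cases hN : PySem.Str.startswith (PySem.Str.upper line) "N:" = true
      · rw [if_pos hN, if_pos hN]
        by_cases hname : pvNName line ≠ ""
        · rw [if_pos hname, if_pos hname, pvScan_n_some]
        · rw [if_neg hname, if_neg hname]
          exact ih
      · rw [if_neg hN, if_neg hN]
        exact ih

-- ===== VERDICT (by name: the statement is the Claim_ definition above) =====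
theorem extract_vcard_name_py_spec : Claim_equal_extract_vcard_name_py := by
  intro block _
  unfold Spec_extract_vcard_name_py extract_vcard_name_py_alt
  exact (pvScan_main block).symm
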